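-- pv_equiv track=rewrite | github.com/Ayy-maker/seo-analyst-agent | agents/reporter/formatter.py | _generate_metrics_table
-- ===== SOURCE A (Python) =====
-- from typing import Dict, List, Any
--
-- def _generate_metrics_table(insights: List[Dict]) -> str:
--     """Generate metrics summary table"""
--     table = "| Metric | Value |\n"
--     table += "|--------|-------|\n"
--     table += f"| Total Findings | {len(insights)} |\n"
--     table += f"| High Severity | {len([i for i in insights if i['severity'] == 'high'])} |\n"
--     table += f"| Medium Severity | {len([i for i in insights if i['severity'] == 'medium'])} |\n"
--     table += f"| Low Severity | {len([i for i in insights if i['severity'] == 'low'])} |\n"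
--
--     return table
-- ===== SOURCE B (Python) =====
-- def _generate_metrics_table(insights):
--     """One fused pass with four integer accumulators; rows rendered from data."""
--     total = high = medium = low = 0
--     for i in insights:
--         s = i['severity']
--         total += 1
--         if s == 'high':
--             high += 1
--         elif s == 'medium':
--             medium += 1
--         elif s == 'low':
--             low += 1
--     header = "| Metric | Value |\n|--------|-------|\n"
--     rows = [("Total Findings", total),
--             ("High Severity", high),
--             ("Medium Severity", medium),
--             ("Low Severity", low)]
--     return header + "".join(f"| {name} | {value} |\n" for name, value in rows)
-- ===== Notes on version B (the rewrite author's own statement) =====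
-- stated objective: simpler
-- what changed: B replaces A's three filter-comprehension scans and literal f-string concatenation by one fused loop over insights maintaining four plain integer accumulators (total/high/medium/low, an if/elif chain, no dict and no filters) and renders the table data-driven by joining formatted (label, value) rows.
import Mathlib
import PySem

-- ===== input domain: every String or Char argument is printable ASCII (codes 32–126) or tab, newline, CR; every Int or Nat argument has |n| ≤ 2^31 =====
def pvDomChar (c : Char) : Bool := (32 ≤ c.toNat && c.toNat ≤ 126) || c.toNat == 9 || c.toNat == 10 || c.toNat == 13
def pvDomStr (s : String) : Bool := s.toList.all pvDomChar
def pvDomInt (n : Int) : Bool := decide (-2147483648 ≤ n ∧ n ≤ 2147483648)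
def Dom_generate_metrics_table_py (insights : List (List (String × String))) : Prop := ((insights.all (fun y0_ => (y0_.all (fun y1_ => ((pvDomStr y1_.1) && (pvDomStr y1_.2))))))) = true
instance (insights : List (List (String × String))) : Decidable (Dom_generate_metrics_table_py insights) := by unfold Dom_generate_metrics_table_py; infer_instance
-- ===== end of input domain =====

-- B replaces A's three filter scans and literal string concatenation by one fused loop with
-- four integer accumulators and a data-driven row rendering (objective: simpler).

-- ===== PORT A =====
def generate_metrics_table_py (insights : List (List (String × String))) : String :=
  let table := "| Metric | Value |\n"
  let table := table ++ "|--------|-------|\n"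
  let table := table ++ "| Total Findings | " ++ PySem.Int.toStr (PySem.List.len insights) ++ " |\n"
  let table := table ++ "| High Severity | " ++ PySem.Int.toStr (PySem.List.len (insights.filter (fun i => (PySem.Dict.mk i).getD "severity" "" == "high"))) ++ " |\n"
  let table := table ++ "| Medium Severity | " ++ PySem.Int.toStr (PySem.List.len (insights.filter (fun i => (PySem.Dict.mk i).getD "severity" "" == "medium"))) ++ " |\n"
  let table := table ++ "| Low Severity | " ++ PySem.Int.toStr (PySem.List.len (insights.filter (fun i => (PySem.Dict.mk i).getD "severity" "" == "low"))) ++ " |\n"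
  table

-- ===== PORT B =====
-- the loop body: s = i['severity']; total += 1; if/elif chain on s
def pvTallyStep (acc : Int × Int × Int × Int) (i : List (String × String)) : Int × Int × Int × Int :=
  let s := (PySem.Dict.mk i).getD "severity" ""
  if s == "high" then (acc.1 + 1, acc.2.1 + 1, acc.2.2.1, acc.2.2.2)
  else if s == "medium" then (acc.1 + 1, acc.2.1, acc.2.2.1 + 1, acc.2.2.2)
  else if s == "low" then (acc.1 + 1, acc.2.1, acc.2.2.1, acc.2.2.2 + 1)
  else (acc.1 + 1, acc.2.1, acc.2.2.1, acc.2.2.2)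

def generate_metrics_table_py_alt (insights : List (List (String × String))) : String :=
  let st := insights.foldl pvTallyStep (0, 0, 0, 0)
  let header := "| Metric | Value |\n|--------|-------|\n"
  let rows : List (String × Int) :=
    [("Total Findings", st.1), ("High Severity", st.2.1),
     ("Medium Severity", st.2.2.1), ("Low Severity", st.2.2.2)]
  header ++ PySem.Str.join "" (rows.map (fun p => "| " ++ p.1 ++ " | " ++ PySem.Int.toStr p.2 ++ " |\n"))

-- ===== PRECONDITION & SPEC =====
-- Pre_ excludes exactly the inputs on which the Python A raises KeyError (and B raises there
-- too): some insight has no 'severity' key. The ports use a total default lookup, so they are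
-- faithful only under Pre_.
def Pre_generate_metrics_table_py (insights : List (List (String × String))) : Prop :=
  (insights.all (fun i => (PySem.Dict.mk i).contains "severity")) = true
instance (insights : List (List (String × String))) : Decidable (Pre_generate_metrics_table_py insights) := by unfold Pre_generate_metrics_table_py; infer_instance
def pvWitness_generate_metrics_table_py : (List (List (String × String))) := [[("severity", "high")], [("severity", "low")]]

def Spec_generate_metrics_table_py (insights : List (List (String × String))) (out : String) : Prop := out = generate_metrics_table_py_alt insights
instance (insights : List (List (String × String))) (out : String) : Decidable (Spec_generate_metrics_table_py insights out) := by unfold Spec_generate_metrics_table_py; infer_instance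

-- ===== CLAIM =====
def Claim_equal_generate_metrics_table_py : Prop := ∀ (insights : List (List (String × String))), Dom_generate_metrics_table_py insights → Pre_generate_metrics_table_py insights → Spec_generate_metrics_table_py insights (generate_metrics_table_py insights)

-- ===== LEMMAS AND PROOFS =====

-- B's fused tally, started at (t,h,m,l), adds the length and the three filter counts A computes.
theorem tally_eq (insights : List (List (String × String))) (t h m l : Int) :
    insights.foldl pvTallyStep (t, h, m, l)
      = (t + insights.length,
         h + (insights.countP (fun i => (PySem.Dict.mk i).getD "severity" "" == "high") : Int),
         m + (insights.countP (fun i => (PySem.Dict.mk i).getD "severity" "" == "medium") : Int),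
         l + (insights.countP (fun i => (PySem.Dict.mk i).getD "severity" "" == "low") : Int)) := by
  induction insights generalizing t h m l with
  | nil => simp
  | cons x xs ih =>
    simp only [List.foldl_cons, List.countP_cons, List.length_cons]
    rw [pvTallyStep]
    by_cases hh : (PySem.Dict.mk x).getD "severity" "" = "high" <;>
      by_cases hm : (PySem.Dict.mk x).getD "severity" "" = "medium" <;>
        by_cases hl : (PySem.Dict.mk x).getD "severity" "" = "low" <;>
          simp_all [Prod.ext_iff] <;> omega

-- ===== VERDICT =====
theorem generate_metrics_table_py_spec : Claim_equal_generate_metrics_table_py := by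
  intro insights _ _
  unfold Spec_generate_metrics_table_py generate_metrics_table_py generate_metrics_table_py_alt
  rw [tally_eq]
  simp only [zero_add, PySem.List.len, ← List.countP_eq_length_filter]
  apply String.ext
  simp [PySem.Str.join, PySem.Chars.join_cons_cons, PySem.Chars.join_singleton]
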